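-- pv_equiv track=rewrite | github.com/msorins/Computational-Logic-Y1S1 | OptionalHomework/numerationBasesModule/classes/numerationBases.py | prod
-- ===== SOURCE A (Python) =====
-- def prod(a, nr, base):
--     '''
--     :param a: vector
--     :param nr: a number with 1 digit in specified base
--     :param base: numeration base
--     :return: a vector containing the multiplication of a with base
--     '''
--     result = []
--     t = 0
--
--     for i in range(len(a)):
--         newRes = a[i] * nr + t
--
--         result.append(newRes % base)
--         t = newRes // base
--
--     while t:
--         result.append(t % base)
--         t = t // base
--
--     return result
-- ===== SOURCE B (Python) =====
-- def prod(a, nr, base):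
--     # B: evaluate the whole vector as one integer (Horner), multiply by nr once,
--     # then emit its digits recursively: len(a) fixed positions, then the carry.
--     n = 0
--     for d in reversed(a):
--         n = n * base + d
--     n *= nr
--
--     def digits(k, t):
--         if k == 0:
--             out = []
--             while t:
--                 out.append(t % base)
--                 t = t // base
--             return out
--         return [t % base] + digits(k - 1, t // base)
--
--     return digits(len(a), n)
-- ===== Notes on version B (the rewrite author's own statement) =====
-- stated objective: alternative
-- what changed: B first evaluates the digit vector as a single integer (Horner) and multiplies it by nr once, then emits that number's base-`base` digits by cons-building recursion (len(a) fixed positions followed by a carry loop), instead of A's fused per-digit multiply-and-carry accumulator loop.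
import Mathlib
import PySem

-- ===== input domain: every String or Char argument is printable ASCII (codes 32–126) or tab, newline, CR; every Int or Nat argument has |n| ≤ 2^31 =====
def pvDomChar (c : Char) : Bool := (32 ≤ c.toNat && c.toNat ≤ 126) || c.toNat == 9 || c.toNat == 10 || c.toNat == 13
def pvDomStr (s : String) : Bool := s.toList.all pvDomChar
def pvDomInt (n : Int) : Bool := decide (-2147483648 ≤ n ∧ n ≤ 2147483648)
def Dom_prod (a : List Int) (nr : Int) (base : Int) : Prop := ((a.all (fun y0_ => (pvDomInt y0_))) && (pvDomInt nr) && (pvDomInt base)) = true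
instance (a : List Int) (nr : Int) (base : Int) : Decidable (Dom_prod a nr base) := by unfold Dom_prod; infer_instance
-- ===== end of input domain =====

-- B replaces A's fused multiply-with-carry accumulator loop by evaluating the vector as
-- one integer, multiplying once, and emitting the digits by recursion (alternative decomposition).

-- ===== PORT A =====
-- 'while t:' carry loop; the fuel argument (2·|t|+1, always sufficient on Pre_prod inputs)
-- only makes the recursion total — the loop body and exit test are Python A's.
def prodCarryF (base : Int) : Nat → Int → List Int
  | 0, _ => []
  | fuel + 1, t =>
    if t = 0 then []
    else PySem.Int.mod t base :: prodCarryF base fuel (PySem.Int.floordiv t base)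

def prodCarry (base t : Int) : List Int := prodCarryF base (2 * t.natAbs + 1) t

def prod (a : List Int) (nr : Int) (base : Int) : List Int :=
  -- for i in range(len(a)): newRes = a[i]*nr + t; result.append(newRes % base); t = newRes // base
  let s := a.foldl (fun (st : List Int × Int) ai =>
      (st.1 ++ [PySem.Int.mod (ai * nr + st.2) base],
       PySem.Int.floordiv (ai * nr + st.2) base)) ([], 0)
  s.1 ++ prodCarry base s.2

-- ===== PORT B =====
-- Source B's inner 'while t:' loop (the k = 0 base case), totalized by the same sufficient fuel
def altEmitF (base : Int) : Nat → Int → List Int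
  | 0, _ => []
  | fuel + 1, t =>
    if t = 0 then []
    else PySem.Int.mod t base :: altEmitF base fuel (PySem.Int.floordiv t base)

-- Source B's recursive digits(k, t): k positions, then the while-carry loop
def altDigits (base : Int) : Nat → Int → List Int
  | 0, t => altEmitF base (2 * t.natAbs + 1) t
  | k + 1, t => PySem.Int.mod t base :: altDigits base k (PySem.Int.floordiv t base)

def prod_alt (a : List Int) (nr : Int) (base : Int) : List Int :=
  -- n = Horner value of a, times nr; then digits(len(a), n)
  altDigits base a.length ((a.reverse.foldl (fun acc d => acc * base + d) 0) * nr)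

-- ===== PRECONDITION & SPEC =====
-- positional value of the digit vector (used only to state Pre_)
def pvValue (a : List Int) (base : Int) : Int := a.foldr (fun d acc => acc * base + d) 0

-- Pre_ is exactly the set of inputs where Python A returns: base = 0 raises
-- ZeroDivisionError (unless a = [], which returns [] before dividing), and the trailing
-- 'while t:' loop diverges for base ≥ 2 when the carried value nr·value(a) is negative
-- and for base = ±1 when it is nonzero.
def Pre_prod (a : List Int) (nr : Int) (base : Int) : Prop :=
  a = [] ∨ (base ≠ 0 ∧ (base ≤ -2 ∨ (2 ≤ base ∧ 0 ≤ nr * pvValue a base)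
      ∨ ((base = 1 ∨ base = -1) ∧ nr * pvValue a base = 0)))
instance (a : List Int) (nr : Int) (base : Int) : Decidable (Pre_prod a nr base) := by
  unfold Pre_prod; infer_instance

def pvWitness_prod : List Int × Int × Int := ([1, 2], 3, 4)

def Spec_prod (a : List Int) (nr : Int) (base : Int) (out : List Int) : Prop := out = prod_alt a nr base
instance (a : List Int) (nr : Int) (base : Int) (out : List Int) : Decidable (Spec_prod a nr base out) := by unfold Spec_prod; infer_instance

-- ===== CLAIM (what is proved, stated in full; the proofs are below) =====
def Claim_equal_prod : Prop := ∀ (a : List Int) (nr : Int) (base : Int), Dom_prod a nr base → Pre_prod a nr base → Spec_prod a nr base (prod a nr base)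

-- ===== LEMMAS AND PROOFS =====

-- B's carry loop is the same function as A's carry loop
lemma emitF_eq (base : Int) : ∀ (fuel : Nat) (t : Int),
    altEmitF base fuel t = prodCarryF base fuel t := by
  intro fuel
  induction fuel with
  | zero => intro t; rfl
  | succ k ih => intro t; simp only [altEmitF, prodCarryF, ih]

-- A's fold with an accumulated result prefix
lemma foldA_acc (nr base : Int) (a : List Int) : ∀ (acc : List Int) (t : Int),
    a.foldl (fun (st : List Int × Int) ai =>
      (st.1 ++ [PySem.Int.mod (ai * nr + st.2) base],
       PySem.Int.floordiv (ai * nr + st.2) base)) (acc, t)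
    = (acc ++ (a.foldl (fun (st : List Int × Int) ai =>
      (st.1 ++ [PySem.Int.mod (ai * nr + st.2) base],
       PySem.Int.floordiv (ai * nr + st.2) base)) ([], t)).1,
       (a.foldl (fun (st : List Int × Int) ai =>
      (st.1 ++ [PySem.Int.mod (ai * nr + st.2) base],
       PySem.Int.floordiv (ai * nr + st.2) base)) ([], t)).2) := by
  induction a with
  | nil => intro acc t; simp
  | cons x xs ih =>
    intro acc t
    simp only [List.foldl_cons, List.nil_append]
    rw [ih, ih [PySem.Int.mod (x * nr + t) base]]
    simp

-- key invariant: B's recursion on k = length, started at A's carry plus nr times the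
-- value of the still-unprocessed digits, produces A's output
lemma key (nr base : Int) (hb : base ≠ 0) : ∀ (a : List Int) (t : Int),
    altDigits base a.length (t + pvValue a base * nr)
    = (a.foldl (fun (st : List Int × Int) ai =>
        (st.1 ++ [PySem.Int.mod (ai * nr + st.2) base],
         PySem.Int.floordiv (ai * nr + st.2) base)) ([], t)).1
      ++ prodCarry base
        ((a.foldl (fun (st : List Int × Int) ai =>
          (st.1 ++ [PySem.Int.mod (ai * nr + st.2) base],
           PySem.Int.floordiv (ai * nr + st.2) base)) ([], t)).2) := by
  intro a
  induction a with
  | nil =>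
    intro t
    simp [pvValue, altDigits, prodCarry, emitF_eq]
  | cons x xs ih =>
    intro t
    have hval : t + pvValue (x :: xs) base * nr
        = (x * nr + t) + base * (pvValue xs base * nr) := by
      simp [pvValue]; ring
    simp only [List.length_cons, altDigits, List.foldl_cons, List.nil_append, hval]
    have hmod : PySem.Int.mod ((x * nr + t) + base * (pvValue xs base * nr)) base
        = PySem.Int.mod (x * nr + t) base := by
      simp [PySem.Int.mod]
    have hdiv : PySem.Int.floordiv ((x * nr + t) + base * (pvValue xs base * nr)) base
        = PySem.Int.floordiv (x * nr + t) base + pvValue xs base * nr := by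
      simp only [PySem.Int.floordiv]
      exact Int.add_mul_fdiv_left _ _ hb
    rw [hmod, hdiv, ih,
      foldA_acc nr base xs [PySem.Int.mod (x * nr + t) base] (PySem.Int.floordiv (x * nr + t) base)]
    simp

-- when a = [] both programs return [] for every base
lemma nil_case (nr base : Int) : prod [] nr base = prod_alt [] nr base := by
  simp [prod, prod_alt, prodCarry, prodCarryF, altDigits, altEmitF]

-- ===== VERDICT (by name: the statement is the Claim_ definition above) =====
theorem prod_spec : Claim_equal_prod := by
  intro a nr base _hdom hpre
  unfold Spec_prod
  rcases hpre with hnil | ⟨hb, _⟩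
  · subst hnil; exact nil_case nr base
  · show prod a nr base = prod_alt a nr base
    simp only [prod, prod_alt]
    rw [List.foldl_reverse]
    have hrev : (a.foldr (fun x y => y * base + x) 0) * nr
        = 0 + pvValue a base * nr := by simp [pvValue]
    rw [hrev, key nr base hb a 0]
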